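-- pv_equiv track=rewrite | github.com/MrBrantCode/unitest_baseline | mut_generate/mist_train_cf/cf_17211/solution.py | extract_numbers_divisible_by_3
-- ===== SOURCE A (Python) =====
-- def extract_numbers_divisible_by_3(s):
--     extracted_numbers = []
--     current_number = ""
--
--     for char in s:
--         if char.isdigit():
--             if current_number:
--                 current_number += char
--             else:
--                 current_number = char
--         else:
--             if current_number:
--                 extracted_numbers.append(int(current_number))
--                 current_number = ""
--
--     if current_number:
--         extracted_numbers.append(int(current_number))
--
--     return [num for num in extracted_numbers if num % 3 == 0]
-- ===== SOURCE B (Python) =====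
-- def extract_numbers_divisible_by_3(s):
--     numbers = []
--     i, n = 0, len(s)
--     while i < n:
--         j = i
--         while j < n and s[j].isdigit() == s[i].isdigit():
--             j += 1
--         if s[i].isdigit():
--             numbers.append(int(s[i:j]))
--         i = j
--     return [x for x in numbers if x % 3 == 0]
-- ===== Notes on version B (the rewrite author's own statement) =====
-- stated objective: alternative
-- what changed: Replaces A's per-character accumulator with a post-loop flush by a two-pointer run scanner: an inner scan finds each maximal run of same-digit-ness, digit runs are sliced and converted in one step, so no pending-number state or flush is needed.
import Mathlib
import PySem

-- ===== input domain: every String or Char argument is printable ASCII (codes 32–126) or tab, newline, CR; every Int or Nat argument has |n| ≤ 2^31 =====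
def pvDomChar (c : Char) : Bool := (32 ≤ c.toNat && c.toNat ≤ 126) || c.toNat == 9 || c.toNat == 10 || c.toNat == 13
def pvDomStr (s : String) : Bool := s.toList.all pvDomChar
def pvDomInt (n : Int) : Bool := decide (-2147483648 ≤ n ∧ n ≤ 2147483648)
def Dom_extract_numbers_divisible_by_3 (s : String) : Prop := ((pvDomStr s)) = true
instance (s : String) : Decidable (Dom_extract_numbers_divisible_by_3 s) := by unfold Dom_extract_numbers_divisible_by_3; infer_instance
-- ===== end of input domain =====

-- B replaces A's per-character accumulator + post-loop flush with a two-pointer run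
-- scanner (alternative decomposition, same O(n) cost); return values proved equal.

-- int(cs) for the nonempty all-digit runs both programs convert; exact there (never none).
def pvParse (cs : List Char) : Int := (PySem.Int.ofStr? (String.ofList cs)).getD 0

-- ===== PORT A =====
-- loop body: the (extracted_numbers, current_number) state, branches in A's order
def pvStepA (st : List Int × List Char) (c : Char) : List Int × List Char :=
  if PySem.Chars.isdigit c then
    (st.1, st.2 ++ [c])
  else
    if st.2 ≠ [] then (st.1 ++ [pvParse st.2], []) else st

def extract_numbers_divisible_by_3 (s : String) : List Int :=
  let st := s.toList.foldl pvStepA ([], [])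
  let nums := if st.2 ≠ [] then st.1 ++ [pvParse st.2] else st.1
  nums.filter (fun num => PySem.Int.mod num 3 == 0)

-- ===== PORT B =====
-- outer while over runs; the inner while (advance j while same digit-ness) is the
-- takeWhile/dropWhile split, s[i:j] is c :: tk
def pvRunsB : List Char → List Int
  | [] => []
  | c :: rest =>
    let tk := rest.takeWhile (fun d => PySem.Chars.isdigit d == PySem.Chars.isdigit c)
    let dr := rest.dropWhile (fun d => PySem.Chars.isdigit d == PySem.Chars.isdigit c)
    (if PySem.Chars.isdigit c then [pvParse (c :: tk)] else []) ++ pvRunsB dr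
  termination_by l => l.length
  decreasing_by
    simp only [List.length_cons]
    exact Nat.lt_succ_of_le (List.length_dropWhile_le _ _)

def extract_numbers_divisible_by_3_alt (s : String) : List Int :=
  (pvRunsB s.toList).filter (fun x => PySem.Int.mod x 3 == 0)

-- ===== PRECONDITION & SPEC =====
def Spec_extract_numbers_divisible_by_3 (s : String) (out : List Int) : Prop := out = extract_numbers_divisible_by_3_alt s
instance (s : String) (out : List Int) : Decidable (Spec_extract_numbers_divisible_by_3 s out) := by unfold Spec_extract_numbers_divisible_by_3; infer_instance

-- ===== CLAIM (what is proved, stated in full; the proofs are below) =====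
def Claim_equal_extract_numbers_divisible_by_3 : Prop := ∀ (s : String), Dom_extract_numbers_divisible_by_3 s → Spec_extract_numbers_divisible_by_3 s (extract_numbers_divisible_by_3 s)

-- ===== LEMMAS AND PROOFS =====

-- reference extractor: structural recursion carrying the pending digit run
def pvExtract (cur : List Char) : List Char → List Int
  | [] => if cur ≠ [] then [pvParse cur] else []
  | c :: rest =>
    if PySem.Chars.isdigit c then pvExtract (cur ++ [c]) rest
    else (if cur ≠ [] then [pvParse cur] else []) ++ pvExtract [] rest

-- A's fold-then-flush equals nums ++ the reference extractor
theorem pvA_eq_extract (l : List Char) : ∀ (nums : List Int) (cur : List Char),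
    (if (l.foldl pvStepA (nums, cur)).2 ≠ [] then
      (l.foldl pvStepA (nums, cur)).1 ++ [pvParse (l.foldl pvStepA (nums, cur)).2]
     else (l.foldl pvStepA (nums, cur)).1) = nums ++ pvExtract cur l := by
  induction l with
  | nil =>
    intro nums cur
    simp only [List.foldl_nil, pvExtract]
    by_cases h : cur = [] <;> simp [h]
  | cons c rest ih =>
    intro nums cur
    simp only [List.foldl_cons, pvExtract, pvStepA]
    by_cases hd : PySem.Chars.isdigit c
    · simp only [hd, if_true]
      exact ih nums (cur ++ [c])
    · simp only [hd, if_false, Bool.false_eq_true]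
      by_cases hc : cur = []
      · simp only [hc]
        simpa using ih nums []
      · simp only [if_pos (by simpa using hc)]
        rw [ih (nums ++ [pvParse cur]) []]
        simp

theorem pvExtract_digits (xs : List Char) (hxs : ∀ x ∈ xs, PySem.Chars.isdigit x = true) :
    ∀ (cur ys : List Char), pvExtract cur (xs ++ ys) = pvExtract (cur ++ xs) ys := by
  induction xs with
  | nil => simp
  | cons x xs ih =>
    intro cur ys
    have hx : PySem.Chars.isdigit x = true := hxs x (by simp)
    simp only [List.cons_append, pvExtract, hx, if_true]
    rw [ih (fun y hy => hxs y (by simp [hy])) (cur ++ [x]) ys]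
    simp

theorem pvExtract_nondigits (xs : List Char) (hxs : ∀ x ∈ xs, PySem.Chars.isdigit x = false) :
    ∀ (ys : List Char), pvExtract [] (xs ++ ys) = pvExtract [] ys := by
  induction xs with
  | nil => simp
  | cons x xs ih =>
    intro ys
    have hx := hxs x (by simp)
    simp only [List.cons_append, pvExtract, hx, Bool.false_eq_true, if_false]
    simp [ih (fun y hy => hxs y (by simp [hy])) ys]

theorem pvExtract_flush (cur : List Char) (hcur : cur ≠ []) (ys : List Char)
    (hys : ys = [] ∨ ∃ d ys', ys = d :: ys' ∧ PySem.Chars.isdigit d = false) :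
    pvExtract cur ys = pvParse cur :: pvExtract [] ys := by
  rcases hys with h | ⟨d, ys', rfl, hd⟩
  · subst h; simp [pvExtract, hcur]
  · simp [pvExtract, hd, hcur]

theorem pvRunsB_eq_extract : ∀ (n : Nat) (l : List Char), l.length ≤ n →
    pvRunsB l = pvExtract [] l := by
  intro n
  induction n with
  | zero =>
    intro l hl
    have : l = [] := List.eq_nil_of_length_eq_zero (Nat.le_zero.mp hl)
    subst this; simp [pvRunsB, pvExtract]
  | succ n ih =>
    intro l hl
    match l with
    | [] => simp [pvRunsB, pvExtract]
    | c :: rest =>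
      set p := fun d => PySem.Chars.isdigit d == PySem.Chars.isdigit c with hp
      have hsplit : rest = rest.takeWhile p ++ rest.dropWhile p :=
        (List.takeWhile_append_dropWhile ..).symm
      have htk : ∀ x ∈ rest.takeWhile p, PySem.Chars.isdigit x = PySem.Chars.isdigit c := by
        intro x hx
        have := List.mem_takeWhile_imp hx
        simpa [hp] using this
      have hdr : rest.dropWhile p = [] ∨
          ∃ d ys', rest.dropWhile p = d :: ys' ∧
            PySem.Chars.isdigit d ≠ PySem.Chars.isdigit c := by
        cases hdw : rest.dropWhile p with
        | nil => exact Or.inl rfl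
        | cons d ys' =>
          refine Or.inr ⟨d, ys', rfl, ?_⟩
          have := List.head?_dropWhile_not p rest
          rw [hdw] at this
          simpa [hp] using this
      have hlen : (rest.dropWhile p).length ≤ n := by
        have h1 : (rest.dropWhile p).length ≤ rest.length := List.length_dropWhile_le _ _
        have h2 : rest.length ≤ n := by simpa using Nat.le_of_succ_le_succ hl
        omega
      rw [pvRunsB]
      by_cases hc : PySem.Chars.isdigit c
      · have hdig : ∀ x ∈ c :: rest.takeWhile p, PySem.Chars.isdigit x = true := by
          intro x hx
          rcases List.mem_cons.mp hx with rfl | hx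
          · exact hc
          · rw [htk x hx]; exact hc
        have : pvExtract [] (c :: rest) =
            pvParse (c :: rest.takeWhile p) :: pvExtract [] (rest.dropWhile p) := by
          conv_lhs => rw [show c :: rest = (c :: rest.takeWhile p) ++ rest.dropWhile p by
            simpa using congrArg (c :: ·) hsplit]
          rw [show pvExtract [] ((c :: rest.takeWhile p) ++ rest.dropWhile p) =
              pvExtract ([] ++ (c :: rest.takeWhile p)) (rest.dropWhile p) from
            pvExtract_digits (c :: rest.takeWhile p) hdig [] (rest.dropWhile p)]
          simp only [List.nil_append]
          refine pvExtract_flush _ (by simp) _ ?_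
          rcases hdr with h | ⟨d, ys', hdw, hne⟩
          · exact Or.inl h
          · exact Or.inr ⟨d, ys', hdw, by
              cases hdx : PySem.Chars.isdigit d
              · rfl
              · exact absurd (by rw [hdx, hc]) hne⟩
        rw [this, ih _ hlen]
        simp [hc, hp]
      · have hnon : ∀ x ∈ c :: rest.takeWhile p, PySem.Chars.isdigit x = false := by
          intro x hx
          rcases List.mem_cons.mp hx with rfl | hx
          · simpa using hc
          · rw [htk x hx]; simpa using hc
        have : pvExtract [] (c :: rest) = pvExtract [] (rest.dropWhile p) := by
          conv_lhs => rw [show c :: rest = (c :: rest.takeWhile p) ++ rest.dropWhile p by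
            simpa using congrArg (c :: ·) hsplit]
          exact pvExtract_nondigits _ hnon _
        rw [this, ih _ hlen]
        simp [hc, hp]

-- ===== VERDICT (by name: the statement is the Claim_ definition above) =====
theorem extract_numbers_divisible_by_3_spec : Claim_equal_extract_numbers_divisible_by_3 := by
  intro s _
  unfold Spec_extract_numbers_divisible_by_3 extract_numbers_divisible_by_3 extract_numbers_divisible_by_3_alt
  rw [pvRunsB_eq_extract s.toList.length s.toList le_rfl]
  have hA := pvA_eq_extract s.toList [] []
  simp only [List.nil_append] at hA
  show List.filter (fun num => PySem.Int.mod num 3 == 0)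
      (if (s.toList.foldl pvStepA ([], [])).2 ≠ [] then
        (s.toList.foldl pvStepA ([], [])).1 ++ [pvParse (s.toList.foldl pvStepA ([], [])).2]
      else (s.toList.foldl pvStepA ([], [])).1) =
      List.filter (fun x => PySem.Int.mod x 3 == 0) (pvExtract [] s.toList)
  rw [hA]
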